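-- pv_equiv track=rewrite | github.com/JulianSampels/ISWC-2026-SJP | code/iswc/dataset_stats.py | _unique_relpaths_3hop
-- ===== SOURCE A (Python) =====
-- from typing import Dict, Iterator, List, NamedTuple, Optional, Set, Tuple
--
-- def _unique_relpaths_3hop(
--     out_adj: Dict[str, List[Tuple[str, str]]],
--     sample_heads: List[str],
-- ) -> int:
--     """Count distinct (r1, r2, r3) relation-path sequences (sampled start entities)."""
--     paths: Set[Tuple[str, str, str]] = set()
--     for h in sample_heads:
--         for r1, mid1 in out_adj.get(h, []):
--             for r2, mid2 in out_adj.get(mid1, []):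
--                 for r3, _ in out_adj.get(mid2, []):
--                     paths.add((r1, r2, r3))
--     return len(paths)
-- ===== SOURCE B (Python) =====
-- def _unique_relpaths_3hop(out_adj, sample_heads):
--     """Count distinct (r1, r2, r3) relation-path sequences (sampled start entities)."""
--     heads = set(sample_heads)
--     s1 = {pair for h in heads for pair in out_adj.get(h, [])}
--     s2 = {(r1, r2, mid2) for (r1, mid1) in s1 for (r2, mid2) in out_adj.get(mid1, [])}
--     s3 = {(r1, r2, r3) for (r1, r2, mid2) in s2 for (r3, _) in out_adj.get(mid2, [])}
--     return len(s3)
-- ===== Notes on version B (the rewrite author's own statement) =====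
-- stated objective: alternative
-- what changed: Instead of enumerating every individual 3-hop path head-by-head as A's four nested loops do, B proceeds breadth-first: it deduplicates the frontier of states after each hop (set of heads, then distinct (r1,mid1) pairs, then distinct (r1,r2,mid2) triples) and expands each distinct state once; on graphs with many duplicate heads or shared intermediate states this avoids re-expanding shared subtrees, at the same cost otherwise.
import Mathlib
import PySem

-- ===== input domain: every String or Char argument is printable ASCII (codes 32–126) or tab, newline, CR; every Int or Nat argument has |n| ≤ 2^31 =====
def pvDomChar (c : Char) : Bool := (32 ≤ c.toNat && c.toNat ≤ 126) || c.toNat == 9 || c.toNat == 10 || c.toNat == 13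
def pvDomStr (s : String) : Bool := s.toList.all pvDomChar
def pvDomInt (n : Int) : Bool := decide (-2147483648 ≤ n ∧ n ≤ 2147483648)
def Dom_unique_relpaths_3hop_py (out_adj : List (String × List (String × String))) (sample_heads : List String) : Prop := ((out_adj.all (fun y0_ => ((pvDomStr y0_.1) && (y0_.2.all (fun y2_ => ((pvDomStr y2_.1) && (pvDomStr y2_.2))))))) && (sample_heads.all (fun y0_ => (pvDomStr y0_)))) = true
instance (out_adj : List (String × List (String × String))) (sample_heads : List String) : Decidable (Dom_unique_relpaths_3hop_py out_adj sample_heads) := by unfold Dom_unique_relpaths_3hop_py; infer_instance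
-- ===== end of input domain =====

-- B counts the same distinct (r1,r2,r3) triples breadth-first: it deduplicates the frontier
-- of states after every hop (distinct heads, then distinct (r1,mid1), then distinct
-- (r1,r2,mid2)) and expands each distinct state once, instead of walking every individual
-- 3-hop path head-by-head as A's four nested loops do.

-- ===== PORT A =====
def unique_relpaths_3hop_py (out_adj : List (String × List (String × String))) (sample_heads : List String) : Int :=
  let d : PySem.Dict String (List (String × String)) := PySem.Dict.mk out_adj
  let paths : PySem.Set (String × String × String) :=
    sample_heads.foldl (fun paths h =>
      (d.getD h []).foldl (fun paths p1 =>
        (d.getD p1.2 []).foldl (fun paths p2 =>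
          (d.getD p2.2 []).foldl (fun paths p3 =>
            PySem.Set.add paths (p1.1, p2.1, p3.1)) paths) paths) paths) PySem.Set.empty
  PySem.Set.len paths

-- ===== PORT B =====
def unique_relpaths_3hop_py_alt (out_adj : List (String × List (String × String))) (sample_heads : List String) : Int :=
  let d : PySem.Dict String (List (String × String)) := PySem.Dict.mk out_adj
  let heads : PySem.Set String := PySem.Set.ofList sample_heads
  let s1 : PySem.Set (String × String) :=
    heads.foldl (fun s h => (d.getD h []).foldl (fun s p => PySem.Set.add s p) s) PySem.Set.empty
  let s2 : PySem.Set (String × String × String) :=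
    s1.foldl (fun s p1 =>
      (d.getD p1.2 []).foldl (fun s p2 => PySem.Set.add s (p1.1, p2.1, p2.2)) s) PySem.Set.empty
  let s3 : PySem.Set (String × String × String) :=
    s2.foldl (fun s t =>
      (d.getD t.2.2 []).foldl (fun s p3 => PySem.Set.add s (t.1, t.2.1, p3.1)) s) PySem.Set.empty
  PySem.Set.len s3

-- ===== PRECONDITION & SPEC =====
def Spec_unique_relpaths_3hop_py (out_adj : List (String × List (String × String))) (sample_heads : List String) (out : Int) : Prop := out = unique_relpaths_3hop_py_alt out_adj sample_heads
instance (out_adj : List (String × List (String × String))) (sample_heads : List String) (out : Int) : Decidable (Spec_unique_relpaths_3hop_py out_adj sample_heads out) := by unfold Spec_unique_relpaths_3hop_py; infer_instance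

-- ===== CLAIM (what is proved, stated in full; the proofs are below) =====
def Claim_equal_unique_relpaths_3hop_py : Prop := ∀ (out_adj : List (String × List (String × String))) (sample_heads : List String), Dom_unique_relpaths_3hop_py out_adj sample_heads → Spec_unique_relpaths_3hop_py out_adj sample_heads (unique_relpaths_3hop_py out_adj sample_heads)

-- ===== LEMMAS AND PROOFS =====

-- Proof-side names for the two programs' set computations (definitionally the ports' bodies).
def pvA (d : PySem.Dict String (List (String × String))) (heads : List String) :
    PySem.Set (String × String × String) :=
  heads.foldl (fun paths h =>
    (d.getD h []).foldl (fun paths p1 =>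
      (d.getD p1.2 []).foldl (fun paths p2 =>
        (d.getD p2.2 []).foldl (fun paths p3 =>
          PySem.Set.add paths (p1.1, p2.1, p3.1)) paths) paths) paths) PySem.Set.empty

def pvB1 (d : PySem.Dict String (List (String × String))) (heads : List String) :
    PySem.Set (String × String) :=
  (PySem.Set.ofList heads).foldl
    (fun s h => (d.getD h []).foldl (fun s p => PySem.Set.add s p) s) PySem.Set.empty

def pvB2 (d : PySem.Dict String (List (String × String))) (s1 : PySem.Set (String × String)) :
    PySem.Set (String × String × String) :=
  s1.foldl (fun s p1 =>
    (d.getD p1.2 []).foldl (fun s p2 => PySem.Set.add s (p1.1, p2.1, p2.2)) s) PySem.Set.empty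

def pvB3 (d : PySem.Dict String (List (String × String)))
    (s2 : PySem.Set (String × String × String)) : PySem.Set (String × String × String) :=
  s2.foldl (fun s t =>
    (d.getD t.2.2 []).foldl (fun s p3 => PySem.Set.add s (t.1, t.2.1, p3.1)) s) PySem.Set.empty

-- Membership through a fold whose step adds exactly the elements satisfying P b ·.
theorem pv_mem_foldl_step {α γ : Type} [BEq γ] [LawfulBEq γ]
    (step : PySem.Set γ → α → PySem.Set γ) (P : α → γ → Prop)
    (hstep : ∀ s b y, y ∈ step s b ↔ y ∈ s ∨ P b y) :
    ∀ (l : List α) (s : PySem.Set γ) (y : γ),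
      y ∈ l.foldl step s ↔ y ∈ s ∨ ∃ b ∈ l, P b y := by
  intro l
  induction l with
  | nil => intro s y; simp
  | cons b l ih =>
    intro s y
    simp only [List.foldl_cons, ih, hstep, List.mem_cons]
    constructor
    · rintro ((h | h) | ⟨c, hc, hP⟩)
      · exact Or.inl h
      · exact Or.inr ⟨b, Or.inl rfl, h⟩
      · exact Or.inr ⟨c, Or.inr hc, hP⟩
    · rintro (h | ⟨c, (rfl | hc), hP⟩)
      · exact Or.inl (Or.inl h)
      · exact Or.inl (Or.inr hP)
      · exact Or.inr ⟨c, hc, hP⟩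

-- Nodup through a fold whose step preserves Nodup.
theorem pv_nodup_foldl_step {α γ : Type}
    (step : PySem.Set γ → α → PySem.Set γ)
    (hstep : ∀ s b, List.Nodup s → List.Nodup (step s b)) :
    ∀ (l : List α) (s : PySem.Set γ), List.Nodup s → List.Nodup (l.foldl step s) := by
  intro l
  induction l with
  | nil => intro s h; simpa using h
  | cons b l ih => intro s h; exact ih _ (hstep s b h)

-- A fold of adds over g b preserves Nodup (it is a Set.update).
theorem pv_nodup_add_fold {β γ : Type} [BEq γ] [LawfulBEq γ]
    (g : List β) (f : β → γ) (s : PySem.Set γ) (hs : List.Nodup s) :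
    List.Nodup (g.foldl (fun s p => PySem.Set.add s (f p)) s) := by
  rw [← PySem.Set.update_map_eq_foldl_add]
  exact PySem.Set.nodup_update _ _ hs

theorem pv_mem_A (d : PySem.Dict String (List (String × String))) (heads : List String)
    (y : String × String × String) :
    y ∈ pvA d heads
    ↔ ∃ h ∈ heads, ∃ p1 ∈ d.getD h [], ∃ p2 ∈ d.getD p1.2 [], ∃ p3 ∈ d.getD p2.2 [],
        y = (p1.1, p2.1, p3.1) := by
  have h3 : ∀ (p1 p2 : String × String) (s : PySem.Set (String × String × String))
      (y : String × String × String),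
      y ∈ (d.getD p2.2 []).foldl (fun paths p3 =>
            PySem.Set.add paths (p1.1, p2.1, p3.1)) s
      ↔ y ∈ s ∨ ∃ p3 ∈ d.getD p2.2 [], y = (p1.1, p2.1, p3.1) := fun p1 p2 s y =>
    pv_mem_foldl_step (fun paths p3 => PySem.Set.add paths (p1.1, p2.1, p3.1))
      (fun (p3 : String × String) y => y = (p1.1, p2.1, p3.1))
      (fun s p3 y => PySem.Set.mem_add s _ y) _ s y
  have h2 : ∀ (p1 : String × String) (s : PySem.Set (String × String × String))
      (y : String × String × String),
      y ∈ (d.getD p1.2 []).foldl (fun paths p2 =>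
            (d.getD p2.2 []).foldl (fun paths p3 =>
              PySem.Set.add paths (p1.1, p2.1, p3.1)) paths) s
      ↔ y ∈ s ∨ ∃ p2 ∈ d.getD p1.2 [], ∃ p3 ∈ d.getD p2.2 [], y = (p1.1, p2.1, p3.1) :=
    fun p1 s y =>
    pv_mem_foldl_step
      (fun paths p2 => (d.getD p2.2 []).foldl (fun paths p3 =>
        PySem.Set.add paths (p1.1, p2.1, p3.1)) paths)
      (fun (p2 : String × String) y => ∃ p3 ∈ d.getD p2.2 [], y = (p1.1, p2.1, p3.1))
      (fun s p2 y => h3 p1 p2 s y) _ s y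
  have h1 := pv_mem_foldl_step
      (fun paths h => (d.getD h []).foldl (fun paths p1 =>
        (d.getD p1.2 []).foldl (fun paths p2 =>
          (d.getD p2.2 []).foldl (fun paths p3 =>
            PySem.Set.add paths (p1.1, p2.1, p3.1)) paths) paths) paths)
      (fun (h : String) y => ∃ p1 ∈ d.getD h [], ∃ p2 ∈ d.getD p1.2 [],
        ∃ p3 ∈ d.getD p2.2 [], y = (p1.1, p2.1, p3.1))
      (fun s h y =>
        pv_mem_foldl_step
          (fun paths p1 => (d.getD p1.2 []).foldl (fun paths p2 =>
            (d.getD p2.2 []).foldl (fun paths p3 =>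
              PySem.Set.add paths (p1.1, p2.1, p3.1)) paths) paths)
          (fun (p1 : String × String) y => ∃ p2 ∈ d.getD p1.2 [], ∃ p3 ∈ d.getD p2.2 [],
            y = (p1.1, p2.1, p3.1))
          (fun s p1 y => h2 p1 s y) _ s y)
      heads PySem.Set.empty y
  simpa [pvA] using h1

theorem pv_nodup_A (d : PySem.Dict String (List (String × String))) (heads : List String) :
    List.Nodup (pvA d heads) := by
  refine pv_nodup_foldl_step _ (fun s h hs => ?_) heads PySem.Set.empty (by simp)
  refine pv_nodup_foldl_step _ (fun s p1 hs => ?_) _ s hs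
  refine pv_nodup_foldl_step _ (fun s p2 hs => ?_) _ s hs
  exact pv_nodup_add_fold _ _ s hs

theorem pv_mem_B1 (d : PySem.Dict String (List (String × String))) (heads : List String)
    (y : String × String) :
    y ∈ pvB1 d heads ↔ ∃ h ∈ heads, y ∈ d.getD h [] := by
  have := pv_mem_foldl_step
    (fun s h => (d.getD h []).foldl (fun s p => PySem.Set.add s p) s)
    (fun (h : String) (y : String × String) => y ∈ d.getD h [])
    (fun s h y => by simpa using PySem.Set.mem_foldl_add (d.getD h []) id s y)
    (PySem.Set.ofList heads) PySem.Set.empty y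
  simpa [pvB1, PySem.Set.mem_ofList] using this

theorem pv_mem_B2 (d : PySem.Dict String (List (String × String)))
    (s1 : PySem.Set (String × String)) (y : String × String × String) :
    y ∈ pvB2 d s1 ↔ ∃ p1 ∈ s1, ∃ p2 ∈ d.getD p1.2 [], y = (p1.1, p2.1, p2.2) := by
  have := pv_mem_foldl_step
    (fun s p1 => (d.getD p1.2 []).foldl (fun s p2 => PySem.Set.add s (p1.1, p2.1, p2.2)) s)
    (fun (p1 : String × String) (y : String × String × String) =>
      ∃ p2 ∈ d.getD p1.2 [], y = (p1.1, p2.1, p2.2))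
    (fun s p1 y => PySem.Set.mem_foldl_add (d.getD p1.2 [])
      (fun p2 => (p1.1, p2.1, p2.2)) s y)
    s1 PySem.Set.empty y
  simpa [pvB2] using this

theorem pv_mem_B3 (d : PySem.Dict String (List (String × String)))
    (s2 : PySem.Set (String × String × String)) (y : String × String × String) :
    y ∈ pvB3 d s2 ↔ ∃ t ∈ s2, ∃ p3 ∈ d.getD t.2.2 [], y = (t.1, t.2.1, p3.1) := by
  have := pv_mem_foldl_step
    (fun s t => (d.getD t.2.2 []).foldl (fun s p3 => PySem.Set.add s (t.1, t.2.1, p3.1)) s)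
    (fun (t : String × String × String) (y : String × String × String) =>
      ∃ p3 ∈ d.getD t.2.2 [], y = (t.1, t.2.1, p3.1))
    (fun s t y => PySem.Set.mem_foldl_add (d.getD t.2.2 [])
      (fun p3 => (t.1, t.2.1, p3.1)) s y)
    s2 PySem.Set.empty y
  simpa [pvB3] using this

theorem pv_nodup_B3 (d : PySem.Dict String (List (String × String)))
    (s2 : PySem.Set (String × String × String)) : List.Nodup (pvB3 d s2) := by
  refine pv_nodup_foldl_step _ (fun s t hs => ?_) s2 PySem.Set.empty (by simp)
  exact pv_nodup_add_fold _ _ s hs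

-- The two programs build the same set of (r1, r2, r3) triples.
theorem pv_perm (d : PySem.Dict String (List (String × String))) (heads : List String) :
    (pvA d heads).Perm (pvB3 d (pvB2 d (pvB1 d heads))) := by
  rw [List.perm_ext_iff_of_nodup (pv_nodup_A d heads) (pv_nodup_B3 d _)]
  intro y
  rw [pv_mem_A, pv_mem_B3]
  constructor
  · rintro ⟨h, hh, p1, hp1, p2, hp2, p3, hp3, rfl⟩
    refine ⟨(p1.1, p2.1, p2.2), ?_, p3, hp3, rfl⟩
    rw [pv_mem_B2]
    exact ⟨p1, (pv_mem_B1 d heads p1).2 ⟨h, hh, hp1⟩, p2, hp2, rfl⟩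
  · rintro ⟨t, ht, p3, hp3, rfl⟩
    rw [pv_mem_B2] at ht
    obtain ⟨p1, hp1, p2, hp2, rfl⟩ := ht
    obtain ⟨h, hh, hp1'⟩ := (pv_mem_B1 d heads p1).1 hp1
    exact ⟨h, hh, p1, hp1', p2, hp2, p3, hp3, rfl⟩

-- ===== VERDICT (by name: the statement is the Claim_ definition above) =====
theorem unique_relpaths_3hop_py_spec : Claim_equal_unique_relpaths_3hop_py := by
  intro out_adj sample_heads _
  show unique_relpaths_3hop_py out_adj sample_heads
      = unique_relpaths_3hop_py_alt out_adj sample_heads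
  show PySem.Set.len (pvA (PySem.Dict.mk out_adj) sample_heads)
      = PySem.Set.len (pvB3 (PySem.Dict.mk out_adj)
          (pvB2 (PySem.Dict.mk out_adj) (pvB1 (PySem.Dict.mk out_adj) sample_heads)))
  simp only [PySem.Set.len]
  exact_mod_cast (pv_perm (PySem.Dict.mk out_adj) sample_heads).length_eq
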